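-- pv_equiv track=rewrite | github.com/KfirPinto/Bacteria-Metric | create_lineage.py | get_all_unique_ranks
-- ===== SOURCE A (Python) =====
-- def get_all_unique_ranks(all_lineage_data):
--     """
--     Get all unique taxonomic ranks from all species data.
--     """
--     all_ranks = set()
--     for lineage_data in all_lineage_data:
--         if "error" not in lineage_data:
--             all_ranks.update(lineage_data.keys())
--
--     # Define a preferred order for common taxonomic ranks
--     rank_order = [
--         "root", "cellular_organisms",  # High-level "no rank" classifications
--         "superkingdom", "kingdom", "subkingdom", "superphylum", "phylum",
--         "subphylum", "superclass", "class", "subclass", "infraclass",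
--         "superorder", "order", "suborder", "infraorder", "parvorder",
--         "superfamily", "family", "subfamily", "tribe", "subtribe",
--         "genus", "subgenus", "species group", "species subgroup", "species"
--     ]
--
--     # Sort ranks according to the preferred order, with unknown ranks at the end
--     sorted_ranks = []
--     for rank in rank_order:
--         if rank in all_ranks:
--             sorted_ranks.append(rank)
--             all_ranks.remove(rank)
--
--     # Add any remaining ranks that weren't in our predefined order
--     sorted_ranks.extend(sorted(all_ranks))
--
--     return sorted_ranks
-- ===== SOURCE B (Python) =====
-- def get_all_unique_ranks(all_lineage_data):
--     """
--     Get all unique taxonomic ranks from all species data.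
--     """
--     rank_order = [
--         "root", "cellular_organisms",  # High-level "no rank" classifications
--         "superkingdom", "kingdom", "subkingdom", "superphylum", "phylum",
--         "subphylum", "superclass", "class", "subclass", "infraclass",
--         "superorder", "order", "suborder", "infraorder", "parvorder",
--         "superfamily", "family", "subfamily", "tribe", "subtribe",
--         "genus", "subgenus", "species group", "species subgroup", "species"
--     ]
--     all_ranks = {k for d in all_lineage_data if "error" not in d for k in d.keys()}
--     rank_index = {rank: i for i, rank in enumerate(rank_order)}
--     # known ranks sort by their position, unknown ranks share the sentinel
--     # position len(rank_order) and fall back to alphabetical order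
--     return sorted(all_ranks, key=lambda r: (rank_index.get(r, len(rank_order)), r))
-- ===== Notes on version B (the rewrite author's own statement) =====
-- stated objective: simpler
-- what changed: Replaces A's two-phase construction (scan the preferred-rank list appending and removing hits from the set, then append the sorted leftovers) with one stable key-sort of the collected set under the tuple key (rank_index.get(r, len(rank_order)), r), the set itself being collected by a comprehension instead of a loop with set.update.
import Mathlib
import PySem

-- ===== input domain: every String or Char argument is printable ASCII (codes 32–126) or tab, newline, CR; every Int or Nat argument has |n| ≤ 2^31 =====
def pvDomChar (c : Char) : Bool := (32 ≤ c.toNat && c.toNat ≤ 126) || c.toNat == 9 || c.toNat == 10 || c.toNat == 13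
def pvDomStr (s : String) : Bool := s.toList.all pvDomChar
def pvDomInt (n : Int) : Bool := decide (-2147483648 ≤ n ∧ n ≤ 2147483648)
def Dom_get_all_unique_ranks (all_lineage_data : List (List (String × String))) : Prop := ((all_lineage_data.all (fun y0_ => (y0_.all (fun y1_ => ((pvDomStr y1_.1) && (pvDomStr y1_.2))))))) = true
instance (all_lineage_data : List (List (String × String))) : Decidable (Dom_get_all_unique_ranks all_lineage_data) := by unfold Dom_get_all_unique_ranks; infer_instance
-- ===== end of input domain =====

-- B replaces A's two-phase ordering (scan the preferred list appending/removing hits, then append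
-- the sorted leftovers) with a single stable key-sort under the tuple key (rank_index.get(r, len), r);
-- objective: simpler.

-- the preferred rank order (the same literal in both Pythons)
def pvRankOrder : List String :=
  ["root", "cellular_organisms",
   "superkingdom", "kingdom", "subkingdom", "superphylum", "phylum",
   "subphylum", "superclass", "class", "subclass", "infraclass",
   "superorder", "order", "suborder", "infraorder", "parvorder",
   "superfamily", "family", "subfamily", "tribe", "subtribe",
   "genus", "subgenus", "species group", "species subgroup", "species"]

-- ===== PORT A =====
def get_all_unique_ranks (all_lineage_data : List (List (String × String))) : List String :=
  -- all_ranks = set(); for …: if "error" not in lineage_data: all_ranks.update(lineage_data.keys())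
  let all_ranks : PySem.Set String :=
    all_lineage_data.foldl
      (fun all_ranks lineage_data =>
        if !(PySem.Dict.ofList lineage_data).contains "error" then
          PySem.Set.update all_ranks (PySem.Dict.ofList lineage_data).keys
        else all_ranks)
      PySem.Set.empty
  -- for rank in rank_order: if rank in all_ranks: sorted_ranks.append(rank); all_ranks.remove(rank)
  -- (all_ranks.remove(rank) is guarded by the membership test, so Set.discard = Set.remove here)
  let st :=
    pvRankOrder.foldl
      (fun st rank =>
        if PySem.Set.contains st.2 rank then (st.1 ++ [rank], PySem.Set.discard st.2 rank)
        else st)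
      (([] : List String), all_ranks)
  -- sorted_ranks.extend(sorted(all_ranks))
  st.1 ++ PySem.List.sorted st.2 (fun x => x)

-- ===== PORT B =====
-- rank_index = {rank: i for i, rank in enumerate(rank_order)}
def pvRankIndex : PySem.Dict String Int :=
  (PySem.List.enumerate pvRankOrder 0).foldl
    (fun d p => PySem.Dict.insert d p.2 p.1) PySem.Dict.empty

-- rank_index.get(r, len(rank_order))
def pvIdx (r : String) : Int := PySem.Dict.getD pvRankIndex r (pvRankOrder.length : Int)

-- the tuple key (rank_index.get(r, len(rank_order)), r); Python compares tuples lexicographically,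
-- which is exactly < on Lex (Int × String)
def pvKey (r : String) : Lex (Int × String) := toLex (pvIdx r, r)

def get_all_unique_ranks_alt (all_lineage_data : List (List (String × String))) : List String :=
  -- all_ranks = {k for d in all_lineage_data if "error" not in d for k in d.keys()}
  let all_ranks : PySem.Set String :=
    PySem.Set.ofList
      ((all_lineage_data.filter (fun d => !(PySem.Dict.ofList d).contains "error")).flatMap
        (fun d => (PySem.Dict.ofList d).keys))
  -- sorted(all_ranks, key=lambda r: (rank_index.get(r, len(rank_order)), r))
  PySem.List.sorted all_ranks pvKey

-- ===== PRECONDITION & SPEC =====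
def Spec_get_all_unique_ranks (all_lineage_data : List (List (String × String))) (out : List String) : Prop := out = get_all_unique_ranks_alt all_lineage_data
instance (all_lineage_data : List (List (String × String))) (out : List String) : Decidable (Spec_get_all_unique_ranks all_lineage_data out) := by unfold Spec_get_all_unique_ranks; infer_instance

-- ===== CLAIM (what is proved, stated in full; the proofs are below) =====
def Claim_equal_get_all_unique_ranks : Prop := ∀ (all_lineage_data : List (List (String × String))), Dom_get_all_unique_ranks all_lineage_data → Spec_get_all_unique_ranks all_lineage_data (get_all_unique_ranks all_lineage_data)

-- ===== LEMMAS AND PROOFS =====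

-- A's set-collection loop builds exactly B's set (same Set.add folds, reassociated)
theorem pv_set_eq (l : List (List (String × String))) (acc : PySem.Set String) :
    l.foldl
      (fun s d =>
        if !(PySem.Dict.ofList d).contains "error" then
          PySem.Set.update s (PySem.Dict.ofList d).keys
        else s) acc
      = ((l.filter (fun d => !(PySem.Dict.ofList d).contains "error")).flatMap
          (fun d => (PySem.Dict.ofList d).keys)).foldl PySem.Set.add acc := by
  induction l generalizing acc with
  | nil => rfl
  | cons d t ih =>
    rw [List.foldl_cons, List.filter_cons]
    cases hc : (PySem.Dict.ofList d).contains "error" with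
    | true =>
      simp only [Bool.not_true, Bool.false_eq_true, if_false]
      exact ih acc
    | false =>
      simp only [Bool.not_false, if_true, List.flatMap_cons, List.foldl_append,
        PySem.Set.update]
      exact ih _

-- membership in a discarded set, away from the discarded element
theorem pv_contains_discard (s : List String) (r x : String) (hx : x ≠ r) :
    PySem.Set.contains (PySem.Set.discard s r) x = PySem.Set.contains s x := by
  simp only [PySem.Set.discard, PySem.Set.contains]
  rw [Bool.eq_iff_iff]
  simp [List.mem_filter, hx]

-- A's scan-and-remove loop, characterised: appends the hits in preferred order, leaves the misses
theorem pv_loop (ro : List String) (acc s : List String) (hro : ro.Nodup) :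
    ro.foldl
      (fun st rank =>
        if PySem.Set.contains st.2 rank then (st.1 ++ [rank], PySem.Set.discard st.2 rank)
        else st) (acc, s)
      = (acc ++ ro.filter (fun r => PySem.Set.contains s r),
         s.filter (fun x => !ro.contains x)) := by
  induction ro generalizing acc s with
  | nil => simp
  | cons r t ih =>
    have hrt : r ∉ t := (List.nodup_cons.mp hro).1
    have hnt : t.Nodup := (List.nodup_cons.mp hro).2
    cases hc : PySem.Set.contains s r with
    | true =>
      rw [List.foldl_cons]
      simp only [hc, if_true]
      rw [ih (acc ++ [r]) (PySem.Set.discard s r) hnt]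
      rw [Prod.mk.injEq]
      constructor
      · rw [List.filter_cons_of_pos (by simpa using hc), List.append_assoc]
        congr 1
        rw [List.singleton_append]
        congr 1
        apply List.filter_congr
        intro x hx
        exact pv_contains_discard s r x (fun h => hrt (h ▸ hx))
      · simp only [PySem.Set.discard, List.filter_filter]
        apply List.filter_congr
        intro x _
        rw [List.contains_cons, Bool.not_or]
        cases x == r <;> cases t.contains x <;> rfl
    | false =>
      rw [List.foldl_cons]
      simp only [hc, if_false, Bool.false_eq_true]
      rw [ih acc s hnt]
      rw [Prod.mk.injEq]
      have hrs : r ∉ s := by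
        intro h
        rw [show PySem.Set.contains s r = s.contains r from rfl] at hc
        simp [h] at hc
      constructor
      · rw [List.filter_cons_of_neg (by simpa using hc)]
      · apply List.filter_congr
        intro x hx
        have hxr : (x == r) = false := by
          simp only [beq_eq_false_iff_ne]
          exact fun h => hrs (h ▸ hx)
        rw [List.contains_cons, hxr, Bool.false_or]

-- the 27 preferred ranks get the indices 0..26
theorem pv_idx_vals :
    pvRankOrder.map pvIdx
      = [0, 1, 2, 3, 4, 5, 6, 7, 8, 9, 10, 11, 12, 13, 14, 15, 16, 17, 18, 19, 20,
         21, 22, 23, 24, 25, 26] := by decide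

theorem pv_keys_rankIndex : PySem.Dict.keys pvRankIndex = pvRankOrder := by decide

theorem pv_idx_mono : pvRankOrder.Pairwise (fun a b => pvIdx a < pvIdx b) := by
  rw [← List.pairwise_map (f := pvIdx)]
  rw [pv_idx_vals]
  decide

theorem pv_idx_lt_len (a : String) (ha : a ∈ pvRankOrder) :
    pvIdx a < (pvRankOrder.length : Int) := by
  have h1 : pvIdx a ∈ pvRankOrder.map pvIdx := List.mem_map_of_mem ha
  rw [pv_idx_vals] at h1
  have h2 : ∀ x ∈ ([0, 1, 2, 3, 4, 5, 6, 7, 8, 9, 10, 11, 12, 13, 14, 15, 16, 17, 18,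
      19, 20, 21, 22, 23, 24, 25, 26] : List Int), x < (pvRankOrder.length : Int) := by decide
  exact h2 _ h1

theorem pv_idx_sentinel (x : String) (hx : pvRankOrder.contains x = false) :
    pvIdx x = (pvRankOrder.length : Int) := by
  apply PySem.Dict.getD_of_not_contains
  cases hc : PySem.Dict.contains pvRankIndex x with
  | false => rfl
  | true =>
    exfalso
    have := (PySem.Dict.contains_iff_mem_keys pvRankIndex x).mp hc
    rw [pv_keys_rankIndex] at this
    simp [this] at hx

theorem pv_rankOrder_nodup : pvRankOrder.Nodup := by decide

-- the key-sort of the collected set IS A's two-phase list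
theorem pv_sortB (s : List String) (hs : s.Nodup) :
    PySem.List.sorted s pvKey
      = pvRankOrder.filter (fun r => PySem.Set.contains s r)
          ++ PySem.List.sorted (s.filter (fun x => !pvRankOrder.contains x)) (fun x => x) := by
  apply PySem.List.sorted_eq_of_perm_of_pairwise_lt
  · -- the right-hand side is a permutation of s
    have h1 : (pvRankOrder.filter (fun r => PySem.Set.contains s r)).Perm
        (s.filter (fun x => pvRankOrder.contains x)) := by
      rw [List.perm_ext_iff_of_nodup (pv_rankOrder_nodup.filter _) (hs.filter _)]
      intro a
      simp only [List.mem_filter, PySem.Set.contains, List.contains_iff_mem]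
      tauto
    have h2 := PySem.List.sorted_perm (s.filter (fun x => !pvRankOrder.contains x)) (fun x => x) false
    exact (h1.append h2).trans (List.filter_append_perm _ s)
  · -- and is strictly increasing under the tuple key
    rw [List.pairwise_append]
    refine ⟨?_, ?_, ?_⟩
    · exact (List.Pairwise.sublist List.filter_sublist pv_idx_mono).imp
        (fun h => Prod.Lex.lt_iff.mpr (Or.inl (by simpa [pvKey] using h)))
    · have hperm := PySem.List.sorted_perm (s.filter (fun x => !pvRankOrder.contains x)) (fun x => x) false
      have hnd2 : (PySem.List.sorted (s.filter (fun x => !pvRankOrder.contains x)) (fun x => x)).Nodup :=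
        hperm.nodup_iff.mpr (hs.filter _)
      have hle := PySem.List.sorted_pairwise (s.filter (fun x => !pvRankOrder.contains x)) (fun x => x)
      have hmem2 : ∀ x ∈ PySem.List.sorted (s.filter (fun y => !pvRankOrder.contains y)) (fun x => x),
          pvRankOrder.contains x = false := by
        intro x hx
        have := hperm.mem_iff.mp hx
        simp only [List.mem_filter, Bool.not_eq_true'] at this
        exact this.2
      refine (hle.and hnd2).imp_of_mem ?_
      intro a b ha hb h
      apply Prod.Lex.lt_iff.mpr
      refine Or.inr ⟨?_, by simpa [pvKey] using lt_of_le_of_ne h.1 h.2⟩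
      simp only [pvKey, ofLex_toLex]
      rw [pv_idx_sentinel a (hmem2 a ha), pv_idx_sentinel b (hmem2 b hb)]
    · intro a ha b hb
      have ha' : a ∈ pvRankOrder := (List.mem_filter.mp ha).1
      have hb' : pvRankOrder.contains b = false := by
        have hperm := PySem.List.sorted_perm (s.filter (fun x => !pvRankOrder.contains x)) (fun x => x) false
        have := hperm.mem_iff.mp hb
        simp only [List.mem_filter, Bool.not_eq_true'] at this
        exact this.2
      apply Prod.Lex.lt_iff.mpr
      refine Or.inl ?_
      simp only [pvKey, ofLex_toLex]
      rw [pv_idx_sentinel b hb']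
      exact pv_idx_lt_len a ha'

-- ===== VERDICT (by name: the statement is the Claim_ definition above) =====
theorem get_all_unique_ranks_spec : Claim_equal_get_all_unique_ranks := by
  intro data _
  unfold Spec_get_all_unique_ranks get_all_unique_ranks get_all_unique_ranks_alt
  simp only []
  rw [pv_set_eq]
  set s : PySem.Set String :=
    PySem.Set.ofList
      ((data.filter (fun d => !(PySem.Dict.ofList d).contains "error")).flatMap
        (fun d => (PySem.Dict.ofList d).keys)) with hsdef
  have hfold : ((data.filter (fun d => !(PySem.Dict.ofList d).contains "error")).flatMap
      (fun d => (PySem.Dict.ofList d).keys)).foldl PySem.Set.add PySem.Set.empty = s := rfl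
  rw [hfold]
  have hs : s.Nodup := PySem.Set.nodup_ofList _
  rw [pv_loop pvRankOrder [] s pv_rankOrder_nodup]
  rw [pv_sortB s hs]
  simp
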